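-- pv_equiv track=rewrite | github.com/Sheng-Bi/graph-theory-based-cluster-analysis | graphTheoryCluster.py | find_all_ones_segments
-- ===== SOURCE A (Python) =====
-- def find_all_ones_segments(arr, min_length):
--     segments = []
--     seg_start = None
--
--     for i in range(len(arr)):
--         if arr[i] == 1 and seg_start is None:
--             seg_start = i
--         elif arr[i] != 1 and seg_start is not None:
--             seg_end = i - 1
--             if seg_end - seg_start + 1 >= min_length:
--                 segments.append((seg_start, seg_end))
--             seg_start = None
--
--     if seg_start is not None and len(arr) - seg_start >= min_length:
--         segments.append((seg_start, len(arr) - 1))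
--
--     return segments
-- ===== SOURCE B (Python) =====
-- def find_all_ones_segments(arr, min_length):
--     segments = []
--     n = len(arr)
--     i = 0
--     while i < n:
--         if arr[i] == 1:
--             j = i + 1
--             while j < n and arr[j] == 1:
--                 j += 1
--             if j - i >= min_length:
--                 segments.append((i, j - 1))
--             i = j
--         else:
--             i += 1
--     return segments
-- ===== Notes on version B (the rewrite author's own statement) =====
-- stated objective: alternative
-- what changed: Replaces A's per-element seg_start flag state machine with a two-pointer run scanner: an inner loop consumes each maximal 1-run in one go and the run is filtered by length on the spot.
import Mathlib
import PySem

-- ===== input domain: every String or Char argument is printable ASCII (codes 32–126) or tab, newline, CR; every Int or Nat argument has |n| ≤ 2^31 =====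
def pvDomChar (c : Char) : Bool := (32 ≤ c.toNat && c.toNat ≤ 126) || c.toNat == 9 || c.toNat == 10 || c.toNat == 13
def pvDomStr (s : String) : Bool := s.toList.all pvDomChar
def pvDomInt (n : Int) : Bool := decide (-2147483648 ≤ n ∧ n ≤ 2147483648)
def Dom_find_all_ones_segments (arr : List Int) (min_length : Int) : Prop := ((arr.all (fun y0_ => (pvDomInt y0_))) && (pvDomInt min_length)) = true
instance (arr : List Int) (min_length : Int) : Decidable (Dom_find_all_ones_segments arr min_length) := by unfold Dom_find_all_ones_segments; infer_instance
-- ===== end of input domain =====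

-- B replaces A's seg_start flag state machine by a two-pointer run scanner (same O(n) cost, plainer decomposition).

-- ===== PORT A =====
-- loop of A: consumes the list element by element, i is the current index,
-- st is seg_start (none / some start), segs the accumulator; returns (segments, seg_start)
def goA (m : Int) : List Int → Int → Option Int → List (Int × Int) → (List (Int × Int) × Option Int)
  | [], _, st, segs => (segs, st)
  | x :: xs, i, st, segs =>
    if x = 1 ∧ st = none then
      goA m xs (i + 1) (some i) segs
    else
      match st with
      | some s =>
        if x ≠ 1 then
          let segEnd := i - 1
          goA m xs (i + 1) none (if segEnd - s + 1 ≥ m then segs ++ [(s, segEnd)] else segs)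
        else goA m xs (i + 1) st segs
      | none => goA m xs (i + 1) st segs

def find_all_ones_segments (arr : List Int) (min_length : Int) : List (Int × Int) :=
  let n : Int := arr.length
  let r := goA min_length arr 0 none []
  match r.2 with
  | some s => if n - s ≥ min_length then r.1 ++ [(s, n - 1)] else r.1
  | none => r.1

-- ===== PORT B =====
-- inner while loop of B: length of the leading run of 1s
def oneRun : List Int → Nat
  | [] => 0
  | x :: xs => if x = 1 then oneRun xs + 1 else 0

-- outer while loop of B: i is the index of the head of the remaining list
def goB (m : Int) : List Int → Int → List (Int × Int)
  | [], _ => []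
  | x :: xs, i =>
    if x = 1 then
      let k : Nat := oneRun xs + 1
      (if (k : Int) ≥ m then [(i, i + (k : Int) - 1)] else []) ++
        goB m (xs.drop (oneRun xs)) (i + (k : Int))
    else
      goB m xs (i + 1)
termination_by l => l.length
decreasing_by
  all_goals simp [List.length_drop]

def find_all_ones_segments_alt (arr : List Int) (min_length : Int) : List (Int × Int) :=
  goB min_length arr 0

-- ===== PRECONDITION & SPEC =====
def Spec_find_all_ones_segments (arr : List Int) (min_length : Int) (out : List (Int × Int)) : Prop := out = find_all_ones_segments_alt arr min_length
instance (arr : List Int) (min_length : Int) (out : List (Int × Int)) : Decidable (Spec_find_all_ones_segments arr min_length out) := by unfold Spec_find_all_ones_segments; infer_instance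

-- ===== CLAIM (what is proved, stated in full; the proofs are below) =====
def Claim_equal_find_all_ones_segments : Prop := ∀ (arr : List Int) (min_length : Int), Dom_find_all_ones_segments arr min_length → Spec_find_all_ones_segments arr min_length (find_all_ones_segments arr min_length)

-- ===== LEMMAS AND PROOFS =====

-- A's loop followed by its final seg_start check, rolled into one recursion
def runA (m : Int) : List Int → Int → Option Int → List (Int × Int) → List (Int × Int)
  | [], i, st, segs =>
    match st with
    | some s => if i - s ≥ m then segs ++ [(s, i - 1)] else segs
    | none => segs
  | x :: xs, i, st, segs =>
    if x = 1 ∧ st = none then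
      runA m xs (i + 1) (some i) segs
    else
      match st with
      | some s =>
        if x ≠ 1 then
          runA m xs (i + 1) none (if (i - 1) - s + 1 ≥ m then segs ++ [(s, i - 1)] else segs)
        else runA m xs (i + 1) st segs
      | none => runA m xs (i + 1) st segs

lemma runA_eq (m : Int) (l : List Int) :
    ∀ (i : Int) (st : Option Int) (segs : List (Int × Int)),
      runA m l i st segs =
        (match (goA m l i st segs).2 with
          | some s => if (i + l.length) - s ≥ m then (goA m l i st segs).1 ++ [(s, i + (l.length : Int) - 1)] else (goA m l i st segs).1
          | none => (goA m l i st segs).1) := by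
  induction l with
  | nil =>
    intro i st segs
    cases st <;> simp [runA, goA]
  | cons x xs ih =>
    intro i st segs
    have hlen : i + (((x :: xs).length : Nat) : Int) = (i + 1) + ((xs.length : Nat) : Int) := by
      push_cast [List.length_cons]; ring
    cases st with
    | none =>
      by_cases h : x = 1
      · rw [show runA m (x :: xs) i none segs = runA m xs (i + 1) (some i) segs from by
          simp [runA, h]]
        rw [show goA m (x :: xs) i none segs = goA m xs (i + 1) (some i) segs from by
          simp [goA, h]]
        rw [hlen]; exact ih (i + 1) (some i) segs
      · rw [show runA m (x :: xs) i none segs = runA m xs (i + 1) none segs from by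
          simp [runA, h]]
        rw [show goA m (x :: xs) i none segs = goA m xs (i + 1) none segs from by
          simp [goA, h]]
        rw [hlen]; exact ih (i + 1) none segs
    | some s =>
      by_cases h : x = 1
      · rw [show runA m (x :: xs) i (some s) segs = runA m xs (i + 1) (some s) segs from by
          simp [runA, h]]
        rw [show goA m (x :: xs) i (some s) segs = goA m xs (i + 1) (some s) segs from by
          simp [goA, h]]
        rw [hlen]; exact ih (i + 1) (some s) segs
      · rw [show runA m (x :: xs) i (some s) segs =
            runA m xs (i + 1) none (if (i - 1) - s + 1 ≥ m then segs ++ [(s, i - 1)] else segs) from by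
          simp [runA, h]]
        rw [show goA m (x :: xs) i (some s) segs =
            goA m xs (i + 1) none (if (i - 1) - s + 1 ≥ m then segs ++ [(s, i - 1)] else segs) from by
          simp [goA, h]]
        rw [hlen]; exact ih (i + 1) none _

-- main invariant: A's rolled loop equals B's run scanner, both starting with no open run (left
-- conjunct) and with an open run started at index s (right conjunct)
lemma runA_goB (m : Int) (l : List Int) :
    (∀ (i : Int) (segs : List (Int × Int)),
        runA m l i none segs = segs ++ goB m l i) ∧
    (∀ (i s : Int) (segs : List (Int × Int)),
        runA m l i (some s) segs =
          segs ++ (if (i - s + (oneRun l : Int)) ≥ m then [(s, i + (oneRun l : Int) - 1)] else []) ++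
            goB m (l.drop (oneRun l)) (i + (oneRun l : Int))) := by
  induction l with
  | nil =>
    constructor
    · intro i segs; simp [runA, goB]
    · intro i s segs
      simp only [runA, oneRun, List.drop_nil, goB, Nat.cast_zero, add_zero, List.append_nil]
      split_ifs <;> simp
  | cons x xs ih =>
    obtain ⟨ih1, ih2⟩ := ih
    constructor
    · intro i segs
      by_cases h : x = 1
      · rw [show runA m (x :: xs) i none segs = runA m xs (i + 1) (some i) segs from by
          simp [runA, h]]
        rw [ih2]
        have harith : i + 1 - i + ((oneRun xs : Nat) : Int) = ((oneRun xs + 1 : Nat) : Int) := by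
          push_cast; ring
        have harith2 : i + 1 + ((oneRun xs : Nat) : Int) = i + ((oneRun xs + 1 : Nat) : Int) := by
          push_cast; ring
        rw [harith, harith2]
        simp only [goB, if_pos h, List.append_assoc]
      · rw [show runA m (x :: xs) i none segs = runA m xs (i + 1) none segs from by
          simp [runA, h]]
        rw [ih1]
        simp [goB, h]
    · intro i s segs
      by_cases h : x = 1
      · rw [show runA m (x :: xs) i (some s) segs = runA m xs (i + 1) (some s) segs from by
          simp [runA, h]]
        rw [ih2]
        have h1 : i + 1 - s + ((oneRun xs : Nat) : Int) = i - s + ((oneRun xs + 1 : Nat) : Int) := by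
          push_cast; ring
        have h2 : i + 1 + ((oneRun xs : Nat) : Int) = i + ((oneRun xs + 1 : Nat) : Int) := by
          push_cast; ring
        rw [h1, h2]
        simp only [oneRun, if_pos h, List.drop_succ_cons]
      · rw [show runA m (x :: xs) i (some s) segs =
            runA m xs (i + 1) none (if (i - 1) - s + 1 ≥ m then segs ++ [(s, i - 1)] else segs) from by
          simp [runA, h]]
        rw [ih1]
        simp only [oneRun, if_neg h, Nat.cast_zero, add_zero, List.drop_zero]
        split_ifs with hA hB hB
        · simp [goB, h]
        · omega
        · omega
        · simp [goB, h]

-- ===== VERDICT (by name: the statement is the Claim_ definition above) =====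
theorem find_all_ones_segments_spec : Claim_equal_find_all_ones_segments := by
  intro arr m _
  unfold Spec_find_all_ones_segments find_all_ones_segments find_all_ones_segments_alt
  have h := runA_eq m arr 0 none []
  have h2 := (runA_goB m arr).1 0 []
  simp only [zero_add, List.nil_append] at h h2
  rw [← h2, h]
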